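-- pv_equiv track=rewrite | github.com/whuhenry/leetcode_solution | LCP 22. 黑白方格画.py | paintingPlan
-- ===== SOURCE A (Python) =====
-- import math
--
-- def paintingPlan(n: int, k: int) -> int:
--     def comb(n,m):
--         return math.factorial(n)//(math.factorial(n-m)*math.factorial(m))
--
--     if k == n * n:
--         return 1
--
--     result = 0
--     for p in range(n):
--         if p * n > k:
--             break
--         base_p = comb(n, p)
--         for q in range(n):
--             cell = (p + q) * n - p * q
--             if cell > k:
--                 break
--             if cell == k:
--                 result += base_p * comb(n, q)
--                 break
--
--     return result
-- ===== SOURCE B (Python) =====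
-- import math
--
-- def paintingPlan(n: int, k: int) -> int:
--     # Per row-count p, solve (p+q)*n - p*q == k for q directly instead of scanning q.
--     if k == n * n:
--         return 1
--     result = 0
--     for p in range(n):
--         if p * n > k:
--             break
--         r = k - p * n
--         d = n - p
--         if r % d == 0:
--             q = r // d
--             if q < n:
--                 result += math.comb(n, p) * math.comb(n, q)
--     return result
-- ===== Notes on version B (the rewrite author's own statement) =====
-- stated objective: faster
-- what changed: For each row count p, B solves the linear equation (p+q)*n - p*q = k for q in closed form (divisibility test + one division) instead of A's inner scan over all q, and uses math.comb instead of the factorial formula.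
import Mathlib
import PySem

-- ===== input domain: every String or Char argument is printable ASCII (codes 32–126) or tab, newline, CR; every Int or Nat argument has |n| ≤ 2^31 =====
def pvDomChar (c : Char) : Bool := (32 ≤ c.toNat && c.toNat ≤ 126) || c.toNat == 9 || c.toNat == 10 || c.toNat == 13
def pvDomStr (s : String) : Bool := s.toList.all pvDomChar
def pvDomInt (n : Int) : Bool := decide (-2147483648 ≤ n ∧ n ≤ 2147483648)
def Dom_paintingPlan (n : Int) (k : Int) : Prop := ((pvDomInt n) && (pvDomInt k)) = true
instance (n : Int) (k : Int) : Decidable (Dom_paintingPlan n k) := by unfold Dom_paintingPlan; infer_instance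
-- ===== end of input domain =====

-- B solves the linear equation (p+q)*n - p*q = k for q directly per p instead of A's inner scan over q (objective: faster).

-- ===== PORT A =====
-- math.factorial; A only applies it to nonnegative arguments (0 ≤ m ≤ n inside the loops), where toNat is exact
def factA (m : Int) : Int := ((Int.toNat m).factorial : Int)

-- A's local helper comb(n,m) = n! // ((n-m)! * m!)
def combA (n m : Int) : Int := PySem.Int.floordiv (factA n) (factA (n - m) * factA m)

-- A's inner loop: for q in range(n) with the two breaks, returning the contribution added to result
def loopQA (n k p basep : Int) : List Int → Int
  | [] => 0
  | q :: qs =>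
    let cell := (p + q) * n - p * q
    if cell > k then 0
    else if cell = k then basep * combA n q
    else loopQA n k p basep qs

-- A's outer loop: for p in range(n) with the break, accumulating result
def loopPA (n k : Int) : List Int → Int
  | [] => 0
  | p :: ps =>
    if p * n > k then 0
    else loopQA n k p (combA n p) (PySem.List.pyRange 0 n 1) + loopPA n k ps

def paintingPlan (n : Int) (k : Int) : Int :=
  if k = n * n then 1
  else loopPA n k (PySem.List.pyRange 0 n 1)

-- ===== PORT B =====
-- math.comb; B only applies it to 0 ≤ m ≤ n, where toNat is exact
def combB (n m : Int) : Int := ((Int.toNat n).choose (Int.toNat m) : Int)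

-- B's single loop over p: closed-form solve for q
def loopPB (n k : Int) : List Int → Int
  | [] => 0
  | p :: ps =>
    if p * n > k then 0
    else
      (let r := k - p * n
       let d := n - p
       if PySem.Int.mod r d = 0 then
         (let q := PySem.Int.floordiv r d
          if q < n then combB n p * combB n q else 0)
       else 0) + loopPB n k ps

def paintingPlan_alt (n : Int) (k : Int) : Int :=
  if k = n * n then 1
  else loopPB n k (PySem.List.pyRange 0 n 1)

-- ===== PRECONDITION & SPEC =====
def Spec_paintingPlan (n : Int) (k : Int) (out : Int) : Prop := out = paintingPlan_alt n k
instance (n : Int) (k : Int) (out : Int) : Decidable (Spec_paintingPlan n k out) := by unfold Spec_paintingPlan; infer_instance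

-- ===== CLAIM (what is proved, stated in full; the proofs are below) =====
def Claim_equal_paintingPlan : Prop := ∀ (n : Int) (k : Int), Dom_paintingPlan n k → Spec_paintingPlan n k (paintingPlan n k)

-- ===== LEMMAS AND PROOFS =====

-- the two comb helpers agree on 0 ≤ m ≤ n
lemma combA_eq_combB (n m : Int) (h0 : 0 ≤ m) (hn : m ≤ n) : combA n m = combB n m := by
  unfold combA combB factA
  set N := Int.toNat n with hN
  set M := Int.toNat m with hM
  have hMN : M ≤ N := by omega
  have hsub : Int.toNat (n - m) = N - M := by omega
  rw [hsub]
  have hpos : (0:Int) < ((N - M).factorial : Int) * (M.factorial : Int) := by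
    positivity
  rw [PySem.Int.floordiv_eq_ediv_of_pos hpos]
  have hkey : N.choose M * M.factorial * (N - M).factorial = N.factorial :=
    Nat.choose_mul_factorial_mul_factorial hMN
  have : (N.factorial : Int) = (N.choose M : Int) * (((N - M).factorial : Int) * (M.factorial : Int)) := by
    push_cast [← hkey]; ring
  rw [this, Int.mul_ediv_cancel _ (by positivity)]

-- A's inner scan over q ∈ [a, n) computes the closed-form solution of (p+q)*n - p*q = k
lemma loopQA_closed (n k p b a : Int) (hpn : p < n) :
    loopQA n k p b (PySem.List.pyRange a n 1) =
      if PySem.Int.mod (k - p * n) (n - p) = 0 ∧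
         a ≤ PySem.Int.floordiv (k - p * n) (n - p) ∧
         PySem.Int.floordiv (k - p * n) (n - p) < n
      then b * combA n (PySem.Int.floordiv (k - p * n) (n - p)) else 0 := by
  set r := k - p * n with hrdef
  set d := n - p with hddef
  have hd : (0:Int) < d := by omega
  rw [PySem.Int.mod_eq_emod_of_pos hd, PySem.Int.floordiv_eq_ediv_of_pos hd]
  induction hm : (n - a).toNat generalizing a with
  | zero =>
    have hna : n ≤ a := by omega
    rw [PySem.List.pyRange_one_eq_nil hna]
    rw [if_neg]
    · rfl
    · rintro ⟨_, h1, h2⟩; omega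
  | succ m ih =>
    have han : a < n := by omega
    rw [PySem.List.pyRange_one_cons han]
    show (if (p + a) * n - p * a > k then 0
      else if (p + a) * n - p * a = k then b * combA n a
      else loopQA n k p b (PySem.List.pyRange (a+1) n 1)) = _
    have hcell : (p + a) * n - p * a = p * n + a * d := by rw [hddef]; ring
    by_cases hgt : (p + a) * n - p * a > k
    · rw [if_pos hgt, if_neg]
      rintro ⟨hmod, hle, _⟩
      have hdvd : d ∣ r := Int.dvd_of_emod_eq_zero hmod
      have hq : d * (r / d) = r := Int.mul_ediv_cancel' hdvd
      have : a * d > r := by omega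
      nlinarith [mul_le_mul_of_nonneg_left hle hd.le]
    · rw [if_neg hgt]
      by_cases heq : (p + a) * n - p * a = k
      · have hq : a * d = r := by omega
        have hdvd : d ∣ r := ⟨a, by linarith [hq, mul_comm a d]⟩
        have hqd : r / d = a := by rw [← hq, Int.mul_ediv_cancel _ hd.ne']
        rw [if_pos heq, if_pos]
        · rw [hqd]
        · exact ⟨Int.emod_eq_zero_of_dvd hdvd, by omega, by omega⟩
      · rw [if_neg heq, ih (a+1) (by omega)]
        by_cases hmod : r % d = 0
        · have hdvd : d ∣ r := Int.dvd_of_emod_eq_zero hmod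
          have hq : d * (r / d) = r := Int.mul_ediv_cancel' hdvd
          have hane : a ≠ r / d := by
            intro h
            apply heq
            rw [hcell, hrdef] at *
            nlinarith [hq, h]
          simp only [hmod, true_and]
          exact if_congr (by constructor <;> (rintro ⟨h2,h3⟩; exact ⟨by omega, h3⟩)) rfl rfl
        · simp [hmod]

-- the two p-loops agree on any list of indices drawn from [0, n)
lemma loops_eq (n k : Int) (l : List Int) (hl : ∀ p ∈ l, 0 ≤ p ∧ p < n) :
    loopPA n k l = loopPB n k l := by
  induction l with
  | nil => rfl
  | cons p ps ih =>
    obtain ⟨hp0, hpn⟩ := hl p (List.mem_cons_self ..)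
    show (if p * n > k then 0
      else loopQA n k p (combA n p) (PySem.List.pyRange 0 n 1) + loopPA n k ps) = _
    by_cases hbr : p * n > k
    · rw [if_pos hbr]; exact (if_pos hbr).symm
    · rw [if_neg hbr]
      show _ = (if p * n > k then 0 else _ + loopPB n k ps)
      rw [if_neg hbr, ih (fun q hq => hl q (List.mem_cons_of_mem _ hq))]
      congr 1
      rw [loopQA_closed n k p _ 0 hpn]
      set r := k - p * n with hrdef
      set d := n - p with hddef
      have hd : (0:Int) < d := by omega
      have hq0 : 0 ≤ PySem.Int.floordiv r d := by
        rw [PySem.Int.floordiv_eq_ediv_of_pos hd]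
        exact Int.ediv_nonneg (by omega) hd.le
      by_cases hmod : PySem.Int.mod r d = 0
      · simp only [hmod, if_pos, true_and]
        by_cases hqn : PySem.Int.floordiv r d < n
        · rw [if_pos ⟨hq0, hqn⟩, if_pos hqn,
            combA_eq_combB n p hp0 hpn.le,
            combA_eq_combB n _ hq0 hqn.le]
        · rw [if_neg (by rintro ⟨_, h⟩; exact hqn h), if_neg hqn]
      · simp [hmod]

-- ===== VERDICT (by name: the statement is the Claim_ definition above) =====
theorem paintingPlan_spec : Claim_equal_paintingPlan := by
  intro n k _
  unfold Spec_paintingPlan paintingPlan paintingPlan_alt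
  by_cases h : k = n * n
  · simp [h]
  · simp only [h, if_false]
    exact loops_eq n k _ (fun p hp => by
      rw [PySem.List.mem_pyRange_one] at hp; exact hp)
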